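-- pv_equiv track=rewrite | github.com/zaobasy/advent_of_code | 2020/day_6.py | get_group_questions
-- ===== SOURCE A (Python) =====
-- import string
--
-- def get_group_questions(in_data, check_type):
--     """
--     Split input into groups and
--
--     check_type = "any" or "all"
--
--     return group selections
--     """
--
--     if check_type not in ['any', 'all']:
--         raise ValueError('Incorrect Check Type {}'.format(check_type))
--
--     groups = []
--     num_lines = len(in_data)
--     idx = 0
--
--     while idx < num_lines:
--
--         if check_type == 'any':
--             group_qs = set()
--         elif check_type == 'all':
--             group_qs = set(string.ascii_lowercase)
--
--         line = in_data[idx]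
--
--         while line:
--
--             if check_type == 'any':
--                 group_qs |= set(line)
--             if check_type == 'all':
--                 group_qs &= set(line)
--
--             idx += 1
--
--             if idx == num_lines:
--                 break
--
--             line = in_data[idx]
--
--         groups.append(group_qs)
--
--         idx += 1
--
--     return groups
-- ===== SOURCE B (Python) =====
-- import string
--
--
-- def get_group_questions(in_data, check_type):
--     """Two-pass rewrite: split the lines into blocks first, then map each
--     block to its answer set in one go."""
--
--     if check_type not in ('any', 'all'):
--         raise ValueError('Incorrect Check Type {}'.format(check_type))
--
--     blocks = []
--     cur = []
--     for line in in_data: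
--         if line:
--             cur.append(line)
--         else:
--             blocks.append(cur)
--             cur = []
--     if cur:
--         blocks.append(cur)
--
--     if check_type == 'any':
--         return [set(''.join(block)) for block in blocks]
--
--     alphabet = set(string.ascii_lowercase)
--     return [alphabet.intersection(*block) for block in blocks]
-- ===== Notes on version B (the rewrite author's own statement) =====
-- stated objective: simpler
-- what changed: A interleaves grouping and set accumulation in one index-driven while loop with nested inner while and per-line set updates; B first splits the lines into blocks with a single accumulator fold, then maps each block to set(''.join(block)) for 'any' or alphabet.intersection(*block) for 'all'.
-- outside the precondition, e.g. on get_group_questions(['ab'], 'both'): A raises ValueError, B raises ValueError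
import Mathlib
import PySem

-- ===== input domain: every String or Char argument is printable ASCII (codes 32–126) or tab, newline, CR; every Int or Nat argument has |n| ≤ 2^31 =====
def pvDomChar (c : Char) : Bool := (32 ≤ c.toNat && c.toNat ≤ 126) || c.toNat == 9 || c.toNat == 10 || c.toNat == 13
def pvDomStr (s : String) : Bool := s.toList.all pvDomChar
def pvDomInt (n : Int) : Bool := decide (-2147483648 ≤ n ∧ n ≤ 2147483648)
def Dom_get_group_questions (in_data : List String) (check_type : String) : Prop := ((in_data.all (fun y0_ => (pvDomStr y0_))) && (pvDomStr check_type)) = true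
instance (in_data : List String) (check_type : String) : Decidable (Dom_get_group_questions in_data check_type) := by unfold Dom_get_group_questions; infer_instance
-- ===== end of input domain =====

-- B splits the lines into blocks with one accumulator fold and then maps each block to its
-- set, instead of A's single index-driven while loop with a nested inner while.
-- Equivalence of A and B is proved on Pre_ (check_type ∈ {"any","all"}; A raises ValueError otherwise).

-- ===== PORT A =====
-- iterating a Python str yields its 1-character strings
def pvChars (l : String) : List String := l.toList.map (fun c => String.mk [c])

def pvAInit (check_type : String) : PySem.Set String :=
  if check_type == "any" then PySem.Set.empty
  else PySem.Set.ofList (pvChars "abcdefghijklmnopqrstuvwxyz")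

-- body of A's inner while: group_qs |= set(line) / group_qs &= set(line)
def pvAUpd (check_type : String) (gq : PySem.Set String) (line : String) : PySem.Set String :=
  let gq1 := if check_type == "any" then PySem.Set.union gq (PySem.Set.ofList (pvChars line)) else gq
  if check_type == "all" then PySem.Set.inter gq1 (PySem.Set.ofList (pvChars line)) else gq1

-- A's inner 'while line:' loop: returns the set and the lines remaining after the
-- delimiter (idx += 1 after the append skips it)
def pvAInner (check_type : String) (gq : PySem.Set String) : List String → PySem.Set String × List String
  | [] => (gq, [])
  | line :: rest =>
    if line = "" then (gq, rest)
    else pvAInner check_type (pvAUpd check_type gq line) rest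

lemma pvAInner_snd_length (ct : String) (gq : PySem.Set String) (xs : List String) :
    (pvAInner ct gq xs).2.length ≤ xs.length := by
  induction xs generalizing gq with
  | nil => simp [pvAInner]
  | cons l rest ih =>
    simp only [pvAInner]
    split
    · simp
    · exact le_trans (ih _) (by simp)

-- A's outer 'while idx < num_lines:' loop
def pvAOuter (check_type : String) : List String → List (List String)
  | [] => []
  | line :: rest =>
    let r := pvAInner check_type (pvAInit check_type) (line :: rest)
    r.1 :: pvAOuter check_type r.2
termination_by xs => xs.length
decreasing_by
  simp only [pvAInner]
  split
  · simp
  · exact Nat.lt_succ_of_le (pvAInner_snd_length _ _ _)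

def get_group_questions (in_data : List String) (check_type : String) : List (List String) :=
  if !(check_type == "any" || check_type == "all") then []   -- A raises ValueError here; excluded by Pre_
  else pvAOuter check_type in_data

-- ===== PORT B =====
-- one accumulator fold: nonempty line extends the current block, empty line closes it
def pvBGroupStep (acc : List (List String) × List String) (line : String) :
    List (List String) × List String :=
  if line = "" then (acc.1 ++ [acc.2], []) else (acc.1, acc.2 ++ [line])

def pvBBlocks (in_data : List String) : List (List String) :=
  let g := in_data.foldl pvBGroupStep ([], [])
  if g.2 = [] then g.1 else g.1 ++ [g.2]   -- 'if cur: blocks.append(cur)'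

def pvBAny (block : List String) : PySem.Set String :=
  PySem.Set.ofList (pvChars (PySem.Str.join "" block))   -- set(''.join(block))

def pvBAll (block : List String) : PySem.Set String :=
  (PySem.Set.ofList (pvChars "abcdefghijklmnopqrstuvwxyz")).filter
    (fun s => block.all (fun l => (pvChars l).contains s))   -- alphabet.intersection(*block)

def get_group_questions_alt (in_data : List String) (check_type : String) : List (List String) :=
  if !(check_type == "any" || check_type == "all") then []   -- raise ValueError; excluded by Pre_
  else if check_type == "any" then (pvBBlocks in_data).map pvBAny
  else (pvBBlocks in_data).map pvBAll

-- ===== PRECONDITION & SPEC =====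
-- A (and B) raise ValueError unless check_type is 'any' or 'all'; nothing else is excluded.
def Pre_get_group_questions (in_data : List String) (check_type : String) : Prop :=
  check_type = "any" ∨ check_type = "all"
instance (in_data : List String) (check_type : String) : Decidable (Pre_get_group_questions in_data check_type) := by unfold Pre_get_group_questions; infer_instance

def pvWitness_get_group_questions : List String × String := (["ab", "bc", "", "", "cd"], "all")

def Spec_get_group_questions (in_data : List String) (check_type : String) (out : List (List String)) : Prop := out = get_group_questions_alt in_data check_type
instance (in_data : List String) (check_type : String) (out : List (List String)) : Decidable (Spec_get_group_questions in_data check_type out) := by unfold Spec_get_group_questions; infer_instance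

-- ===== CLAIM (what is proved, stated in full; the proofs are below) =====
def Claim_equal_get_group_questions : Prop := ∀ (in_data : List String) (check_type : String), Dom_get_group_questions in_data check_type → Pre_get_group_questions in_data check_type → Spec_get_group_questions in_data check_type (get_group_questions in_data check_type)

-- ===== LEMMAS AND PROOFS =====

-- the Bool form of A's 'while line:' guard
def pvNE (l : String) : Bool := !(l == "")

-- finalize over the fold state, as pvBBlocks does
def pvFin (g : List (List String) × List String) : List (List String) :=
  if g.2 = [] then g.1 else g.1 ++ [g.2]

lemma pvFin_append (bs : List (List String)) (g : List (List String) × List String) :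
    pvFin (bs ++ g.1, g.2) = bs ++ pvFin g := by
  unfold pvFin; split <;> simp

lemma pvBGroupStep_append (bs : List (List String)) (cur : List String) (xs : List String) :
    xs.foldl pvBGroupStep (bs, cur)
      = (bs ++ (xs.foldl pvBGroupStep ([], cur)).1, (xs.foldl pvBGroupStep ([], cur)).2) := by
  induction xs generalizing bs cur with
  | nil => simp
  | cons l rest ih =>
    simp only [List.foldl_cons]
    by_cases h : l = "" <;> simp only [pvBGroupStep, h, if_pos, if_neg, ite_true, ite_false] <;>
      rw [ih] <;> conv_rhs => rw [ih]
    all_goals simp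

-- A's inner loop = (fold over the leading run, suffix after the delimiter)
lemma pvAInner_eq (ct : String) (gq : PySem.Set String) (xs : List String) :
    pvAInner ct gq xs
      = ((xs.takeWhile pvNE).foldl (pvAUpd ct) gq, (xs.dropWhile pvNE).tail) := by
  induction xs generalizing gq with
  | nil => simp [pvAInner]
  | cons l rest ih =>
    by_cases h : l = ""
    · simp [pvAInner, h, pvNE, List.takeWhile_cons, List.dropWhile_cons]
    · simp [pvAInner, h, pvNE, List.takeWhile_cons, List.dropWhile_cons, ih]

-- B's grouping fold, split at the first delimiter
lemma pvB_split (cur : List String) (xs : List String) :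
    pvFin (xs.foldl pvBGroupStep ([], cur))
      = if (xs.dropWhile pvNE) = []
        then (if cur ++ xs.takeWhile pvNE = [] then [] else [cur ++ xs.takeWhile pvNE])
        else (cur ++ xs.takeWhile pvNE)
              :: pvFin (((xs.dropWhile pvNE).tail).foldl pvBGroupStep ([], [])) := by
  induction xs generalizing cur with
  | nil => simp [pvFin]
  | cons l rest ih =>
    by_cases h : l = ""
    · subst h
      have hstep : List.foldl pvBGroupStep ([], cur) ("" :: rest)
          = List.foldl pvBGroupStep ([cur], []) rest := by
        simp [pvBGroupStep]
      have hdrop : List.dropWhile pvNE ("" :: rest) = "" :: rest := by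
        simp [pvNE, List.dropWhile_cons]
      have htake : List.takeWhile pvNE ("" :: rest) = [] := by
        simp [pvNE, List.takeWhile_cons]
      rw [hstep, pvBGroupStep_append, hdrop, htake]
      rw [if_neg (List.cons_ne_nil _ _), List.tail_cons, List.append_nil]
      simpa using pvFin_append [cur] (List.foldl pvBGroupStep ([], []) rest)
    · have hb : pvNE l = true := by simp [pvNE, h]
      have hstep : List.foldl pvBGroupStep ([], cur) (l :: rest)
          = List.foldl pvBGroupStep ([], cur ++ [l]) rest := by
        simp [pvBGroupStep, h]
      rw [hstep, ih (cur ++ [l])]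
      simp [List.takeWhile_cons, List.dropWhile_cons, hb]

-- set-update by a deduplicated list is update by the list itself
lemma pvUpdate_ofList (s : PySem.Set String) (cs : List String) :
    PySem.Set.update s (PySem.Set.ofList cs) = PySem.Set.update s cs := by
  induction cs using List.reverseRecOn generalizing s with
  | nil => rfl
  | append_singleton ys y ih =>
    by_cases hy : y ∈ PySem.Set.ofList ys
    · rw [PySem.Set.ofList_append_singleton, PySem.Set.add_of_mem hy, ih,
        PySem.Set.update_append]
      have hmem : y ∈ PySem.Set.update s ys :=
        (PySem.Set.mem_update _ _ _).2 (Or.inr ((PySem.Set.mem_ofList _ _).1 hy))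
      exact (PySem.Set.add_of_mem hmem).symm
    · rw [PySem.Set.ofList_append_singleton, PySem.Set.add_of_not_mem hy,
        PySem.Set.update_append, PySem.Set.update_append, ih]

lemma pvContains_ofList (cs : List String) (x : String) :
    PySem.Set.contains (PySem.Set.ofList cs) x = cs.contains x := by
  rw [PySem.Set.contains_eq_listContains]
  by_cases h : x ∈ cs
  · have h2 : x ∈ PySem.Set.ofList cs := (PySem.Set.mem_ofList _ _).2 h
    simp [h, h2]
  · have h2 : x ∉ PySem.Set.ofList cs := fun hx => h ((PySem.Set.mem_ofList _ _).1 hx)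
    simp [h, h2]

-- A's 'any' accumulation over a block is one big update
lemma pvA_any_fold (s : PySem.Set String) (b : List String) :
    b.foldl (pvAUpd "any") s = PySem.Set.update s ((b.map pvChars).flatten) := by
  induction b generalizing s with
  | nil => simp [PySem.Set.update]
  | cons l rest ih =>
    simp only [List.foldl_cons, List.map_cons, List.flatten_cons]
    rw [ih, PySem.Set.update_append]
    congr 1
    show pvAUpd "any" s l = PySem.Set.update s (pvChars l)
    simp only [pvAUpd, PySem.Set.union]
    rw [pvUpdate_ofList]
    rfl

-- A's 'all' accumulation over a block is one filter by membership in every line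
lemma pvA_all_fold (s : PySem.Set String) (b : List String) :
    b.foldl (pvAUpd "all") s
      = s.filter (fun x => b.all (fun l => (pvChars l).contains x)) := by
  induction b generalizing s with
  | nil => simp
  | cons l rest ih =>
    simp only [List.foldl_cons]
    rw [ih]
    show (PySem.Set.inter s (PySem.Set.ofList (pvChars l))).filter _ = _
    simp only [PySem.Set.inter, List.filter_filter, List.all_cons]
    apply List.filter_congr
    intro x _
    rw [pvContains_ofList]
    exact Bool.and_comm _ _

-- chars of ''.join(block) are the concatenated chars of the block
lemma pvChars_join (b : List String) :
    pvChars (PySem.Str.join "" b) = (b.map pvChars).flatten := by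
  unfold pvChars
  rw [PySem.Str.toList_join]
  have hnil : ∀ parts : List (List Char), PySem.Chars.join [] parts = parts.flatten := by
    intro parts
    induction parts with
    | nil => rfl
    | cons p ps ih =>
      cases ps with
      | nil => simp [PySem.Chars.join, List.intercalate]
      | cons q qs =>
        have : PySem.Chars.join [] (p :: q :: qs) = p ++ PySem.Chars.join [] (q :: qs) := by
          simp [PySem.Chars.join, List.intercalate, List.intersperse]
        rw [this, ih]; simp
  show ((PySem.Chars.join "".toList (b.map String.toList)).map _) = _
  have : ("" : String).toList = [] := rfl
  rw [this, hnil, List.map_flatten, List.map_map]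
  rfl

lemma pvBlock_any (b : List String) : b.foldl (pvAUpd "any") (pvAInit "any") = pvBAny b := by
  rw [pvA_any_fold]
  unfold pvBAny
  rw [pvChars_join]
  rfl

lemma pvBlock_all (b : List String) : b.foldl (pvAUpd "all") (pvAInit "all") = pvBAll b := by
  rw [pvA_all_fold]
  rfl

-- the one block-set function used on both sides
def pvF (ct : String) (b : List String) : PySem.Set String :=
  if ct == "any" then pvBAny b else pvBAll b

lemma pvBlock (ct : String) (hct : ct = "any" ∨ ct = "all") (b : List String) :
    b.foldl (pvAUpd ct) (pvAInit ct) = pvF ct b := by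
  rcases hct with h | h <;> subst h
  · simpa [pvF] using pvBlock_any b
  · simpa [pvF] using pvBlock_all b

-- main: A's loop = map over B's blocks
lemma pvOuter_eq (ct : String) (hct : ct = "any" ∨ ct = "all") (xs : List String) :
    pvAOuter ct xs = (pvFin (xs.foldl pvBGroupStep ([], []))).map (pvF ct) := by
  induction hn : xs.length using Nat.strong_induction_on generalizing xs with
  | _ n ih =>
  cases xs with
  | nil => simp [pvAOuter, pvFin]
  | cons l rest =>
    rw [pvAOuter, pvAInner_eq, pvB_split]
    cases hd : (l :: rest).dropWhile pvNE with
    | nil =>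
      have ht : (l :: rest).takeWhile pvNE = l :: rest := by
        have h2 := List.takeWhile_append_dropWhile (p := pvNE) (l := l :: rest)
        rw [hd] at h2; simpa using h2
      rw [ht]
      simp [pvAOuter, pvBlock ct hct]
    | cons l2 r2 =>
      have hlen : r2.length < (l :: rest).length := by
        have h1 : (l2 :: r2).length ≤ (l :: rest).length :=
          hd ▸ List.length_dropWhile_le pvNE (l :: rest)
        simp at h1 ⊢; omega
      rw [if_neg (List.cons_ne_nil l2 r2), List.map_cons]
      simp only [List.nil_append]
      exact congrArg₂ List.cons (pvBlock ct hct _) (ih r2.length (hn ▸ hlen) r2 rfl)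

-- ===== VERDICT (by name: the statement is the Claim_ definition above) =====
theorem get_group_questions_spec : Claim_equal_get_group_questions := by
  intro in_data check_type _hdom hpre
  unfold Spec_get_group_questions get_group_questions get_group_questions_alt
  rcases hpre with h | h <;> subst h
  · simpa [pvF] using pvOuter_eq "any" (Or.inl rfl) in_data
  · simpa [pvF, pvBBlocks, pvFin] using pvOuter_eq "all" (Or.inr rfl) in_data
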